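-- pv_equiv track=rewrite | github.com/wangyendt/LeetCode | Contests/200-300/week 208/1601. Maximum Number of Achievable Transfer Requests/Maximum Number of Achievable Transfer Requests.py | maximumRequests
-- ===== SOURCE A (Python) =====
-- from typing import List
--
-- import collections
-- import itertools
--
-- def maximumRequests(n: int, requests: List[List[int]]) -> int:
--     def check(arr: List[List[int]]) -> bool:
--         n_in, n_out = collections.defaultdict(int), collections.defaultdict(int)
--         for a1, a2 in arr:
--             n_out[a1] += 1
--             n_in[a2] += 1
--         for key in range(n):
--             if n_in[key] != n_out[key]:
--                 return False
--         return True
--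
--     m = len(requests)
--     for i in range(1, m + 1)[::-1]:
--         for a in itertools.combinations(requests, i):
--             if check(a):
--                 return i
--     return 0
-- ===== SOURCE B (Python) =====
-- def maximumRequests(n, requests):
--     m = len(requests)
--     best = 0
--     for mask in range(2 ** m):
--         bits = mask
--         balance = {}
--         cnt = 0
--         for a, b in requests:
--             sel = bits % 2
--             bits = bits // 2
--             if sel != 0:
--                 balance[a] = balance.get(a, 0) + 1
--                 balance[b] = balance.get(b, 0) - 1
--                 cnt += 1
--         if all(v == 0 for k, v in balance.items() if 0 <= k < n):
--             best = max(best, cnt)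
--     return best
-- ===== Notes on version B (the rewrite author's own statement) =====
-- stated objective: alternative
-- what changed: Replaced the descending-size nested itertools.combinations loops with early return by a single flat bitmask enumeration of all subsets that decodes each mask arithmetically, accumulates one net per-building balance dict (out minus in) instead of two separate in/out counters, checks balance by scanning the dict's own entries instead of all keys in range(n), and keeps a running maximum.
import Mathlib
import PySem

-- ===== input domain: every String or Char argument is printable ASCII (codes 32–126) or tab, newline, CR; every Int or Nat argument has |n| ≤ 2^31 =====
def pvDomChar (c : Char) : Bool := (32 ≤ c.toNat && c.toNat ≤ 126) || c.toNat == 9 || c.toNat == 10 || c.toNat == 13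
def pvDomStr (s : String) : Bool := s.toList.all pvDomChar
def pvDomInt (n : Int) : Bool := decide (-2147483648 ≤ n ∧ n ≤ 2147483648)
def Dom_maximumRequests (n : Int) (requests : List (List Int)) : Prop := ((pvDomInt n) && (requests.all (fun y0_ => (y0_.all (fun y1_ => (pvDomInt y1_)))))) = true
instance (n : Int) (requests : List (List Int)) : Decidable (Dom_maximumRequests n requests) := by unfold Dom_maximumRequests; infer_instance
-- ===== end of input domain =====

-- B replaces A's descending-size combinations loops with early return by a flat bitmask
-- enumeration maintaining a running maximum and one net balance dict (alternative decomposition).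

-- the 'for a1, a2 in …' unpacking of a row; none is where Python raises (excluded by Pre_)
def pvRow2? : List Int → Option (Int × Int)
  | [a, b] => some (a, b)
  | _ => none

-- ===== PORT A =====
-- one loop body of A's check: n_out[a1] += 1; n_in[a2] += 1 (state = (n_in, n_out))
def pvStepA (st : PySem.Dict Int Int × PySem.Dict Int Int) (row : List Int) :
    PySem.Dict Int Int × PySem.Dict Int Int :=
  match pvRow2? row with
  | some (a1, a2) => (st.1.insert a2 (st.1.getD a2 0 + 1), st.2.insert a1 (st.2.getD a1 0 + 1))
  | none => st

-- 'for key in range(n): if n_in[key] != n_out[key]: return False / return True' — range is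
-- lazy and the loop early-returns, so the port recurses on the counter (&& short-circuits)
def pvCheckKeys (n_in n_out : PySem.Dict Int Int) (key n : Int) : Bool :=
  if h : key < n then
    (n_in.getD key 0 == n_out.getD key 0) && pvCheckKeys n_in n_out (key + 1) n
  else true
termination_by (n - key).toNat
decreasing_by omega

def pvCheckA (n : Int) (arr : List (List Int)) : Bool :=
  let st := arr.foldl pvStepA (PySem.Dict.empty, PySem.Dict.empty)
  pvCheckKeys st.1 st.2 0 n

-- 'for a in itertools.combinations(requests, k): if check(a): return' — the generator is
-- lazy and the loop early-returns, so the port enumerates the same tuples in the same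
-- (lexicographic-by-index) order with short-circuit ||; chosen holds the picked prefix reversed
def pvAnyCombo (n : Int) (chosen : List (List Int)) : Nat → List (List Int) → Bool
  | 0, _ => pvCheckA n chosen.reverse
  | _ + 1, [] => false
  | Nat.succ k, x :: rest => pvAnyCombo n (x :: chosen) k rest || pvAnyCombo n chosen (k + 1) rest

-- the loop 'for i in range(1, m+1)[::-1]: …' with its early return
def pvLoopA (n : Int) (requests : List (List Int)) : Nat → Int
  | 0 => 0
  | Nat.succ i =>
    if pvAnyCombo n [] (i + 1) requests then ((i + 1 : Nat) : Int)
    else pvLoopA n requests i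

def maximumRequests (n : Int) (requests : List (List Int)) : Int :=
  pvLoopA n requests requests.length

-- ===== PORT B =====
-- balance[a] = balance.get(a,0)+1; balance[b] = balance.get(b,0)-1
def pvBalStep (d : PySem.Dict Int Int) (row : List Int) : PySem.Dict Int Int :=
  match pvRow2? row with
  | some (a, b) =>
    let d1 := d.insert a (d.getD a 0 + 1)
    d1.insert b (d1.getD b 0 - 1)
  | none => d

-- one iteration of B's inner decode loop; state = (bits, balance, cnt)
def pvStepB (st : Int × PySem.Dict Int Int × Int) (row : List Int) :
    Int × PySem.Dict Int Int × Int :=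
  let sel := PySem.Int.mod st.1 2
  let bits := PySem.Int.floordiv st.1 2
  if sel ≠ 0 then (bits, pvBalStep st.2.1 row, st.2.2 + 1)
  else (bits, st.2.1, st.2.2)

def maximumRequests_alt (n : Int) (requests : List (List Int)) : Int :=
  (PySem.List.pyRange 0 ((2 : Int) ^ requests.length) 1).foldl
    (fun best mask =>
      let st := requests.foldl pvStepB (mask, PySem.Dict.empty, 0)
      if st.2.1.items.all (fun p => if 0 ≤ p.1 ∧ p.1 < n then p.2 == 0 else true)
      then max best st.2.2 else best)
    0

-- ===== PRECONDITION & SPEC =====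
-- Pre_ excludes requests containing a row whose length is not 2: on those the Python A
-- raises ValueError while unpacking 'for a1, a2 in arr' (and Python B likewise raises).
def Pre_maximumRequests (_n : Int) (requests : List (List Int)) : Prop :=
  ∀ row ∈ requests, row.length = 2
instance (n : Int) (requests : List (List Int)) : Decidable (Pre_maximumRequests n requests) := by
  unfold Pre_maximumRequests; infer_instance

def pvWitness_maximumRequests : Int × List (List Int) := (2, [[0, 1], [1, 0]])

def Spec_maximumRequests (n : Int) (requests : List (List Int)) (out : Int) : Prop := out = maximumRequests_alt n requests
instance (n : Int) (requests : List (List Int)) (out : Int) : Decidable (Spec_maximumRequests n requests out) := by unfold Spec_maximumRequests; infer_instance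

-- ===== CLAIM (what is proved, stated in full; the proofs are below) =====
def Claim_equal_maximumRequests : Prop := ∀ (n : Int) (requests : List (List Int)), Dom_maximumRequests n requests → Pre_maximumRequests n requests → Spec_maximumRequests n requests (maximumRequests n requests)

-- ===== LEMMAS AND PROOFS =====

-- the subsequence of xs selected by the low bits of `bits` (bit j of mask ↔ xs[j])
def pvSelect : Int → List (List Int) → List (List Int)
  | _, [] => []
  | bits, x :: xs =>
    if PySem.Int.mod bits 2 ≠ 0 then x :: pvSelect (PySem.Int.floordiv bits 2) xs
    else pvSelect (PySem.Int.floordiv bits 2) xs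

def pvShift : Int → List (List Int) → Int
  | bits, [] => bits
  | bits, _ :: xs => pvShift (PySem.Int.floordiv bits 2) xs

def pvOutCnt (k : Int) : List (List Int) → Int
  | [] => 0
  | row :: rest =>
    (match pvRow2? row with | some (a, _) => if k = a then 1 else 0 | none => 0) + pvOutCnt k rest

def pvInCnt (k : Int) : List (List Int) → Int
  | [] => 0
  | row :: rest =>
    (match pvRow2? row with | some (_, b) => if k = b then 1 else 0 | none => 0) + pvInCnt k rest

def pvOk (n : Int) (sel : List (List Int)) : Bool :=
  (PySem.List.pyRange 0 n 1).all
    (fun k => (sel.foldl pvBalStep PySem.Dict.empty).getD k 0 == 0)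

def pvGood (n : Int) (xs : List (List Int)) (r : Int) : Prop :=
  (∃ s, s.Sublist xs ∧ pvOk n s = true ∧ (s.length : Int) = r) ∧
  (∀ s, s.Sublist xs → pvOk n s = true → (s.length : Int) ≤ r)

lemma pvGood_unique (n : Int) (xs : List (List Int)) (r r' : Int)
    (h : pvGood n xs r) (h' : pvGood n xs r') : r = r' := by
  obtain ⟨⟨s, hs, hok, hl⟩, hb⟩ := h
  obtain ⟨⟨s', hs', hok', hl'⟩, hb'⟩ := h'
  have := hb' s hs hok
  have := hb s' hs' hok'
  omega

-- net balance of the fold of pvBalStep, per key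
lemma pvBal_getD (sel : List (List Int)) (d : PySem.Dict Int Int) (k : Int) :
    (sel.foldl pvBalStep d).getD k 0 = d.getD k 0 + pvOutCnt k sel - pvInCnt k sel := by
  induction sel generalizing d with
  | nil => simp [pvOutCnt, pvInCnt]
  | cons row rest ih =>
    rw [List.foldl_cons, ih, pvOutCnt, pvInCnt]
    cases h : pvRow2? row with
    | none => simp [pvBalStep, h]
    | some p =>
      obtain ⟨a, b⟩ := p
      simp only [pvBalStep, h, PySem.Dict.getD_insert]
      by_cases hkb : k = b <;> by_cases hka : k = a <;>
        simp_all <;> omega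

-- A's two count dicts, per key
lemma pvA_getD (arr : List (List Int)) (din dout : PySem.Dict Int Int) (k : Int) :
    (arr.foldl pvStepA (din, dout)).1.getD k 0 = din.getD k 0 + pvInCnt k arr ∧
    (arr.foldl pvStepA (din, dout)).2.getD k 0 = dout.getD k 0 + pvOutCnt k arr := by
  induction arr generalizing din dout with
  | nil => simp [pvInCnt, pvOutCnt]
  | cons row rest ih =>
    rw [List.foldl_cons, pvInCnt, pvOutCnt]
    cases h : pvRow2? row with
    | none =>
      have hA : pvStepA (din, dout) row = (din, dout) := by simp [pvStepA, h]
      rw [hA]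
      have := ih din dout
      simp only [h]
      constructor <;> omega
    | some p =>
      obtain ⟨a1, a2⟩ := p
      have hA : pvStepA (din, dout) row =
          (din.insert a2 (din.getD a2 0 + 1), dout.insert a1 (dout.getD a1 0 + 1)) := by
        simp [pvStepA, h]
      rw [hA]
      have := ih (din.insert a2 (din.getD a2 0 + 1)) (dout.insert a1 (dout.getD a1 0 + 1))
      simp only [PySem.Dict.getD_insert] at this
      obtain ⟨h1, h2⟩ := this
      rw [h1, h2]
      constructor
      · by_cases hk : k = a2 <;> simp_all <;> omega
      · by_cases hk : k = a1 <;> simp_all <;> omega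

lemma pvCheckKeys_eq_all (d1 d2 : PySem.Dict Int Int) (key n : Int) :
    pvCheckKeys d1 d2 key n =
      (PySem.List.pyRange key n 1).all (fun k => d1.getD k 0 == d2.getD k 0) := by
  generalize hm : (n - key).toNat = m
  induction m generalizing key with
  | zero =>
    rw [pvCheckKeys, dif_neg (by omega), PySem.List.pyRange_one_eq_nil (by omega)]
    simp
  | succ m ih =>
    have hlt : key < n := by omega
    rw [pvCheckKeys, dif_pos hlt, PySem.List.pyRange_one_cons hlt, List.all_cons,
        ih (key + 1) (by omega)]

lemma pvBal_nodup (sel : List (List Int)) (d : PySem.Dict Int Int) (h : d.keys.Nodup) :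
    (sel.foldl pvBalStep d).keys.Nodup := by
  induction sel generalizing d with
  | nil => simpa
  | cons row rest ih =>
    rw [List.foldl_cons]
    apply ih
    cases hr : pvRow2? row with
    | none => simpa [pvBalStep, hr]
    | some p =>
      obtain ⟨a, b⟩ := p
      simp only [pvBalStep, hr]
      exact PySem.Dict.nodup_keys_insert _ _ _ (PySem.Dict.nodup_keys_insert _ _ _ h)

-- the dict-items check B performs equals the range(n) scan A performs
lemma pvItemsAll_eq_ok (n : Int) (sel : List (List Int)) :
    ((sel.foldl pvBalStep PySem.Dict.empty).items.all
      (fun p => if 0 ≤ p.1 ∧ p.1 < n then p.2 == 0 else true)) = pvOk n sel := by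
  have hnd : (sel.foldl pvBalStep PySem.Dict.empty).keys.Nodup :=
    pvBal_nodup sel PySem.Dict.empty (by simp [PySem.Dict.nodup_keys_empty])
  rw [Bool.eq_iff_iff]
  unfold pvOk
  simp only [List.all_eq_true, PySem.List.mem_pyRange_one, beq_iff_eq]
  constructor
  · intro h k hk
    by_cases hc : (sel.foldl pvBalStep PySem.Dict.empty).contains k
    · obtain ⟨v, hv⟩ : ∃ v, (sel.foldl pvBalStep PySem.Dict.empty).get? k = some v := by
        rw [PySem.Dict.contains_eq_isSome_get?] at hc
        exact Option.isSome_iff_exists.mp hc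
      have hm := PySem.Dict.mem_items_of_get?_eq_some _ hv
      have hz := h (k, v) hm
      rw [if_pos hk] at hz
      simp only [beq_iff_eq] at hz
      rw [PySem.Dict.getD_of_get?_eq_some _ _ hv, hz]
    · rw [PySem.Dict.getD_of_not_contains _ _ (by simpa using hc)]
  · intro h p hp
    obtain ⟨k, v⟩ := p
    split_ifs with hk
    · have hg := PySem.Dict.getD_of_mem_items _ hp hnd 0
      simp only [beq_iff_eq]
      rw [← hg]
      exact h k hk
    · rfl

lemma pvCheckA_eq (n : Int) (arr : List (List Int)) : pvCheckA n arr = pvOk n arr := by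
  have key : ∀ k : Int,
      ((arr.foldl pvStepA (PySem.Dict.empty, PySem.Dict.empty)).1.getD k 0 ==
        (arr.foldl pvStepA (PySem.Dict.empty, PySem.Dict.empty)).2.getD k 0) =
      ((arr.foldl pvBalStep PySem.Dict.empty).getD k 0 == 0) := by
    intro k
    have h := pvA_getD arr PySem.Dict.empty PySem.Dict.empty k
    have hb := pvBal_getD arr PySem.Dict.empty k
    rw [Bool.eq_iff_iff]
    simp only [beq_iff_eq]
    rw [h.1, h.2, hb]
    simp only [PySem.Dict.getD_empty]
    omega
  simp only [pvCheckA, pvCheckKeys_eq_all, pvOk, key]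

lemma pvOk_nil (n : Int) : pvOk n [] = true := by
  unfold pvOk
  simp

lemma pvAnyCombo_iff (n : Int) (xs : List (List Int)) :
    ∀ (k : Nat) (chosen : List (List Int)),
      pvAnyCombo n chosen k xs = true ↔
        ∃ c, c.Sublist xs ∧ c.length = k ∧ pvCheckA n (chosen.reverse ++ c) = true := by
  induction xs with
  | nil =>
    intro k chosen
    cases k with
    | zero =>
      simp only [pvAnyCombo]
      constructor
      · intro h; exact ⟨[], List.Sublist.refl _, rfl, by simpa using h⟩
      · rintro ⟨c, hc, hl, hchk⟩
        have hce : c = [] := List.sublist_nil.mp hc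
        subst hce; simpa using hchk
    | succ k =>
      simp only [pvAnyCombo]
      constructor
      · intro h; simp at h
      · rintro ⟨c, hc, hl, -⟩
        have hce : c = [] := List.sublist_nil.mp hc
        subst hce
        simp at hl
  | cons x rest ih =>
    intro k chosen
    cases k with
    | zero =>
      simp only [pvAnyCombo]
      constructor
      · intro h; exact ⟨[], List.nil_sublist _, rfl, by simpa using h⟩
      · rintro ⟨c, hc, hl, hchk⟩
        have hce : c = [] := List.length_eq_zero_iff.mp hl
        subst hce; simpa using hchk
    | succ k =>
      rw [pvAnyCombo, Bool.or_eq_true, ih k (x :: chosen), ih (k + 1) chosen]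
      constructor
      · rintro (⟨c, hc, hl, hchk⟩ | ⟨c, hc, hl, hchk⟩)
        · exact ⟨x :: c, hc.cons₂ x, by simp [hl], by simpa using hchk⟩
        · exact ⟨c, hc.cons x, hl, hchk⟩
      · rintro ⟨c, hc, hl, hchk⟩
        rcases List.sublist_cons_iff.mp hc with h | ⟨r, rfl, hr⟩
        · exact Or.inr ⟨c, h, hl, hchk⟩
        · exact Or.inl ⟨r, hr, by simpa using hl, by simpa using hchk⟩

lemma pvSelect_sublist (bits : Int) (xs : List (List Int)) : (pvSelect bits xs).Sublist xs := by
  induction xs generalizing bits with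
  | nil => simp [pvSelect]
  | cons x rest ih =>
    rw [pvSelect]
    split_ifs
    · exact (ih _).cons₂ x
    · exact (ih _).cons x

lemma pvSelect_encode (xs s : List (List Int)) (h : s.Sublist xs) :
    ∃ mask : Int, 0 ≤ mask ∧ mask < (2 : Int) ^ xs.length ∧ pvSelect mask xs = s := by
  induction h with
  | slnil => exact ⟨0, by norm_num, by norm_num, rfl⟩
  | cons x h ih =>
    obtain ⟨m', h0, hlt, hsel⟩ := ih
    refine ⟨2 * m', by omega, ?_, ?_⟩
    · rw [List.length_cons, pow_succ]; omega
    · rw [pvSelect, PySem.Int.mod_eq_emod_of_pos (by norm_num),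
          PySem.Int.floordiv_eq_ediv_of_pos (by norm_num)]
      have h1 : (2 * m') % 2 = 0 := by omega
      have h2 : (2 * m') / 2 = m' := by omega
      rw [h1, h2]
      simpa using hsel
  | cons₂ x h ih =>
    obtain ⟨m', h0, hlt, hsel⟩ := ih
    refine ⟨2 * m' + 1, by omega, ?_, ?_⟩
    · rw [List.length_cons, pow_succ]; omega
    · rw [pvSelect, PySem.Int.mod_eq_emod_of_pos (by norm_num),
          PySem.Int.floordiv_eq_ediv_of_pos (by norm_num)]
      have h1 : (2 * m' + 1) % 2 = 1 := by omega
      have h2 : (2 * m' + 1) / 2 = m' := by omega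
      rw [h1, h2]
      simp [hsel]

-- decode: B's inner fold computes the net balance and size of the selected subsequence
lemma pvDecode (xs : List (List Int)) (bits : Int) (d : PySem.Dict Int Int) (c : Int) :
    xs.foldl pvStepB (bits, d, c) =
      (pvShift bits xs, (pvSelect bits xs).foldl pvBalStep d, c + ((pvSelect bits xs).length : Int)) := by
  induction xs generalizing bits d c with
  | nil => simp [pvShift, pvSelect]
  | cons x rest ih =>
    rw [List.foldl_cons, pvShift, pvSelect]
    simp only [pvStepB]
    split_ifs with h
    · rw [ih]
      simp only [List.foldl_cons, List.length_cons, Prod.mk.injEq, true_and]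
      push_cast
      ring
    · rw [ih]

-- the running-max fold: init ≤ result, every admitted score ≤ result, result is init or a score
lemma pvFoldMax (ok : Int → Bool) (f : Int → Int) (L : List Int) (b : Int) :
    b ≤ L.foldl (fun best mask => if ok mask then max best (f mask) else best) b ∧
    (∀ m ∈ L, ok m = true → f m ≤ L.foldl (fun best mask => if ok mask then max best (f mask) else best) b) ∧
    (L.foldl (fun best mask => if ok mask then max best (f mask) else best) b = b ∨
      ∃ m ∈ L, ok m = true ∧
        L.foldl (fun best mask => if ok mask then max best (f mask) else best) b = f m) := by
  induction L generalizing b with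
  | nil => simp
  | cons x rest ih =>
    rw [List.foldl_cons]
    by_cases hx : ok x = true
    · simp only [hx, if_true]
      obtain ⟨ih0, ih1, ih2⟩ := ih (max b (f x))
      refine ⟨le_trans (le_max_left _ _) ih0, ?_, ?_⟩
      · intro m hm hok
        rcases List.mem_cons.mp hm with rfl | hm
        · exact le_trans (le_max_right _ _) ih0
        · exact ih1 m hm hok
      · rcases ih2 with h | ⟨m', hm', hok', h⟩
        · rcases max_choice b (f x) with hb | hb
          · left; rw [h, hb]
          · right; exact ⟨x, List.mem_cons_self, hx, by rw [h, hb]⟩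
        · right; exact ⟨m', List.mem_cons_of_mem x hm', hok', h⟩
    · simp only [hx, Bool.false_eq_true, if_false]
      obtain ⟨ih0, ih1, ih2⟩ := ih b
      refine ⟨ih0, ?_, ?_⟩
      · intro m hm hok
        rcases List.mem_cons.mp hm with rfl | hm
        · exact absurd hok hx
        · exact ih1 m hm hok
      · rcases ih2 with h | ⟨m', hm', hok', h⟩
        · exact Or.inl h
        · exact Or.inr ⟨m', List.mem_cons_of_mem x hm', hok', h⟩

lemma pvLoopA_good (n : Int) (xs : List (List Int)) :
    ∀ i : Nat, (∀ s, s.Sublist xs → pvOk n s = true → s.length ≤ i) →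
      pvGood n xs (pvLoopA n xs i) := by
  intro i
  induction i with
  | zero =>
    intro h
    refine ⟨⟨[], List.nil_sublist xs, pvOk_nil n, rfl⟩, ?_⟩
    intro s hs hok
    have := h s hs hok
    simp only [pvLoopA]
    omega
  | succ i ih =>
    intro h
    rw [pvLoopA]
    by_cases hany : pvAnyCombo n [] (i + 1) xs = true
    · rw [if_pos hany]
      obtain ⟨c, hs, hl, hchk⟩ := (pvAnyCombo_iff n xs (i + 1) []).mp hany
      have hok : pvOk n c = true := by
        rw [← pvCheckA_eq]
        simpa using hchk
      refine ⟨⟨c, hs, hok, by rw [hl]⟩, ?_⟩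
      intro s hsub hok'
      have := h s hsub hok'
      omega
    · rw [if_neg hany]
      apply ih
      intro s hs hok
      have hle := h s hs hok
      rcases Nat.lt_or_ge s.length (i + 1) with hlt | hge
      · omega
      · exfalso
        have hlen : s.length = i + 1 := by omega
        refine hany ((pvAnyCombo_iff n xs (i + 1) []).mpr ⟨s, hs, hlen, ?_⟩)
        simpa [pvCheckA_eq] using hok

lemma pvA_good (n : Int) (xs : List (List Int)) : pvGood n xs (maximumRequests n xs) := by
  unfold maximumRequests
  exact pvLoopA_good n xs xs.length (fun s hs _ => hs.length_le)

lemma pvB_good (n : Int) (xs : List (List Int)) : pvGood n xs (maximumRequests_alt n xs) := by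
  have hfold : maximumRequests_alt n xs =
      (PySem.List.pyRange 0 ((2 : Int) ^ xs.length) 1).foldl
        (fun best mask => if pvOk n (pvSelect mask xs) then max best ((pvSelect mask xs).length : Int) else best) 0 := by
    unfold maximumRequests_alt
    congr 1
    funext best mask
    rw [pvDecode]
    simp only []
    rw [pvItemsAll_eq_ok]
    simp
  obtain ⟨_, h1, h2⟩ := pvFoldMax (fun mask => pvOk n (pvSelect mask xs))
    (fun mask => ((pvSelect mask xs).length : Int)) (PySem.List.pyRange 0 ((2 : Int) ^ xs.length) 1) 0
  constructor
  · rcases h2 with h | ⟨m, _, hok, h⟩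
    · exact ⟨[], List.nil_sublist xs, pvOk_nil n, by rw [hfold, h]; rfl⟩
    · exact ⟨pvSelect m xs, pvSelect_sublist m xs, hok, by rw [hfold, h]⟩
  · intro s hs hok
    obtain ⟨mask, hm0, hmlt, hsel⟩ := pvSelect_encode xs s hs
    have hmem : mask ∈ PySem.List.pyRange 0 ((2 : Int) ^ xs.length) 1 :=
      (PySem.List.mem_pyRange_one).mpr ⟨hm0, hmlt⟩
    have := h1 mask hmem (by rw [hsel]; exact hok)
    rw [hsel] at this
    rw [hfold]
    exact this

-- ===== VERDICT (by name: the statement is the Claim_ definition above) =====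
theorem maximumRequests_spec : Claim_equal_maximumRequests := by
  intro n requests _ _
  unfold Spec_maximumRequests
  exact pvGood_unique n requests _ _ (pvA_good n requests) (pvB_good n requests)
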